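-- pv_equiv track=rewrite | github.com/Neuro-Mechatronics-Interfaces/python-open-ephys | examples/interface/record_emg_imu.py | _parse_channel_list
-- ===== SOURCE A (Python) =====
-- from typing import List, Dict
--
-- def _parse_channel_list(arg: str, observed: List[int]) -> List[int]:
--     obs_set = set(observed)
--     s = arg.strip().lower()
--     if s in ("", "all", "*"):
--         return sorted(observed)
--     out = []
--     for part in arg.split(","):
--         part = part.strip()
--         if not part:
--             continue
--         if "-" in part:
--             lo, hi = part.split("-", 1)
--             try:
--                 lo = int(lo); hi = int(hi)
--                 for ch in range(min(lo, hi), max(lo, hi) + 1):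
--                     if ch in obs_set:
--                         out.append(ch)
--             except Exception:
--                 pass
--         else:
--             try:
--                 ch = int(part)
--                 if ch in obs_set:
--                     out.append(ch)
--             except Exception:
--                 pass
--     return sorted(set(out))
-- ===== SOURCE B (Python) =====
-- from typing import List
--
-- def _parse_channel_list(arg: str, observed: List[int]) -> List[int]:
--     s = arg.strip().lower()
--     if s in ("", "all", "*"):
--         return sorted(observed)
--     singles = set()
--     ranges = []
--     for part in arg.split(","):
--         part = part.strip()
--         if not part:
--             continue
--         if "-" in part:
--             a, b = part.split("-", 1)
--             try:
--                 a = int(a); b = int(b)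
--             except ValueError:
--                 continue
--             ranges.append((min(a, b), max(a, b)))
--         else:
--             try:
--                 singles.add(int(part))
--             except ValueError:
--                 continue
--     hit = {c for c in observed
--            if c in singles or any(lo <= c <= hi for lo, hi in ranges)}
--     return sorted(hit)
-- ===== Notes on version B (the rewrite author's own statement) =====
-- stated objective: alternative
-- what changed: A expands every 'lo-hi' part by iterating the whole integer range and testing set membership per integer; B instead collects the parsed intervals and single channels once and makes one pass over the observed channels, keeping those lying inside any interval or in the single set (cheap when ranges are wide, at the cost of one pass over observed per spec).
import Mathlib
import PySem

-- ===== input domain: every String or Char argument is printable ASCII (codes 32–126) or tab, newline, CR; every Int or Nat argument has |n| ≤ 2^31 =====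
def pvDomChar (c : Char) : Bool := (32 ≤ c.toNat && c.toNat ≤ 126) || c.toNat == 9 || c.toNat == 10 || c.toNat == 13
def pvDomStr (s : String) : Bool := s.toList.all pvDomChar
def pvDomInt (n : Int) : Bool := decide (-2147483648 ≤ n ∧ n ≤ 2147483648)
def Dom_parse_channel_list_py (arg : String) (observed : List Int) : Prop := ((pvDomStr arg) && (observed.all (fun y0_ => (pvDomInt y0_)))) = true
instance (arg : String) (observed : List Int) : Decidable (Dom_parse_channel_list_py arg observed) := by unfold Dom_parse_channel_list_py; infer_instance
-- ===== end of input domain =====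

-- B replaces A's per-range integer sweep by collecting the parsed intervals/singles once and
-- filtering the observed channels against them (a different traversal; return value identical).

-- ===== PORT A =====
-- body of A's `for part in arg.split(",")` loop (one iteration)
def pvA_body (obs_set : PySem.Set Int) (out : List Int) (part0 : String) : List Int :=
  -- part = part0.strip(), inlined at each use
  if PySem.Str.strip part0 = "" then out
  else if PySem.Str.isIn "-" (PySem.Str.strip part0) then
    -- part.split("-", 1): sep ≠ "" so split succeeds, and "-" ∈ part gives ≥ 2 pieces
    match PySem.Str.splitMax? (PySem.Str.strip part0) "-" 1 with
    | some (lo :: hi :: _) =>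
      match PySem.Int.ofStr? lo, PySem.Int.ofStr? hi with
      | some lo, some hi =>
        (PySem.List.pyRange (min lo hi) (max lo hi + 1) 1).foldl
          (fun out ch => if PySem.Set.contains obs_set ch then out ++ [ch] else out) out
      | _, _ => out   -- except: pass
    | _ => out
  else
    match PySem.Int.ofStr? (PySem.Str.strip part0) with
    | some ch => if PySem.Set.contains obs_set ch then out ++ [ch] else out
    | none => out     -- except: pass

def parse_channel_list_py (arg : String) (observed : List Int) : List Int :=
  -- s = arg.strip().lower(); obs_set = set(observed); both inlined at their uses
  if PySem.Str.lower (PySem.Str.strip arg) = "" ∨ PySem.Str.lower (PySem.Str.strip arg) = "all" ∨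
      PySem.Str.lower (PySem.Str.strip arg) = "*" then
    PySem.List.sorted observed (fun x => x)
  else
    -- arg.split(","): sep ≠ "" so split? is some
    PySem.List.sorted
      (PySem.Set.ofList (((PySem.Str.split? arg ",").getD []).foldl (pvA_body (PySem.Set.ofList observed)) []))
      (fun x => x)

-- ===== PORT B =====
-- body of B's parsing loop: accumulate the set of single channels and the list of closed intervals
def pvB_body (acc : PySem.Set Int × List (Int × Int)) (part0 : String) : PySem.Set Int × List (Int × Int) :=
  if PySem.Str.strip part0 = "" then acc
  else if PySem.Str.isIn "-" (PySem.Str.strip part0) then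
    match PySem.Str.splitMax? (PySem.Str.strip part0) "-" 1 with
    | some (a :: b :: _) =>
      match PySem.Int.ofStr? a, PySem.Int.ofStr? b with
      | some a, some b => (acc.1, acc.2 ++ [(min a b, max a b)])
      | _, _ => acc
    | _ => acc
  else
    match PySem.Int.ofStr? (PySem.Str.strip part0) with
    | some c => (PySem.Set.add acc.1 c, acc.2)
    | none => acc

def pvB_pred (acc : PySem.Set Int × List (Int × Int)) (c : Int) : Bool :=
  PySem.Set.contains acc.1 c || acc.2.any (fun r => decide (r.1 ≤ c) && decide (c ≤ r.2))

def parse_channel_list_py_alt (arg : String) (observed : List Int) : List Int :=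
  if PySem.Str.lower (PySem.Str.strip arg) = "" ∨ PySem.Str.lower (PySem.Str.strip arg) = "all" ∨
      PySem.Str.lower (PySem.Str.strip arg) = "*" then
    PySem.List.sorted observed (fun x => x)
  else
    PySem.List.sorted
      (PySem.Set.ofList (observed.filter
        (pvB_pred (((PySem.Str.split? arg ",").getD []).foldl pvB_body (PySem.Set.empty, [])))))
      (fun x => x)

-- ===== PRECONDITION & SPEC =====
def Spec_parse_channel_list_py (arg : String) (observed : List Int) (out : List Int) : Prop := out = parse_channel_list_py_alt arg observed
instance (arg : String) (observed : List Int) (out : List Int) : Decidable (Spec_parse_channel_list_py arg observed out) := by unfold Spec_parse_channel_list_py; infer_instance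

-- ===== CLAIM (what is proved, stated in full; the proofs are below) =====
def Claim_equal_parse_channel_list_py : Prop := ∀ (arg : String) (observed : List Int), Dom_parse_channel_list_py arg observed → Spec_parse_channel_list_py arg observed (parse_channel_list_py arg observed)

-- ===== LEMMAS AND PROOFS =====

-- proof-only spec: does the (stripped) part `p` select channel `x`?
def pvHit (p : String) (x : Int) : Bool :=
  if PySem.Str.strip p = "" then false
  else if PySem.Str.isIn "-" (PySem.Str.strip p) then
    match PySem.Str.splitMax? (PySem.Str.strip p) "-" 1 with
    | some (a :: b :: _) =>
      match PySem.Int.ofStr? a, PySem.Int.ofStr? b with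
      | some a, some b => decide (min a b ≤ x) && decide (x ≤ max a b)
      | _, _ => false
    | _ => false
  else
    match PySem.Int.ofStr? (PySem.Str.strip p) with
    | some c => x == c
    | none => false

theorem pv_contains_iff (obs : List Int) (x : Int) :
    PySem.Set.contains (PySem.Set.ofList obs) x = true ↔ x ∈ obs := by
  unfold PySem.Set.contains
  rw [List.contains_iff_mem, PySem.Set.mem_ofList]

theorem pvA_body_mem (obs : List Int) (out : List Int) (p : String) (x : Int) :
    x ∈ pvA_body (PySem.Set.ofList obs) out p ↔
      x ∈ out ∨ (x ∈ obs ∧ pvHit p x = true) := by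
  unfold pvA_body pvHit
  split
  · simp
  · split
    · rcases h : PySem.Str.splitMax? (PySem.Str.strip p) "-" 1 with _ | ps
      · simp
      · match ps with
        | [] => simp
        | [a] => simp
        | a :: b :: t =>
          simp only []
          rcases ha : PySem.Int.ofStr? a with _ | la <;>
            rcases hb : PySem.Int.ofStr? b with _ | lb <;> simp only []
          · simp
          · simp
          · simp
          · rw [PySem.List.foldl_append_if_eq_filter]
            simp only [List.mem_append, List.mem_filter, PySem.List.mem_pyRange_one,
              pv_contains_iff, Bool.and_eq_true, decide_eq_true_eq]
            constructor
            · rintro (h1 | ⟨⟨h2, h3⟩, h4⟩)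
              · exact Or.inl h1
              · exact Or.inr ⟨h4, h2, by omega⟩
            · rintro (h1 | ⟨h2, h3, h4⟩)
              · exact Or.inl h1
              · exact Or.inr ⟨⟨h3, by omega⟩, h2⟩
    · rcases hc : PySem.Int.ofStr? (PySem.Str.strip p) with _ | c
      · simp
      · simp only []
        split
        · rename_i hin
          rw [pv_contains_iff] at hin
          simp only [List.mem_append, List.mem_singleton, beq_iff_eq]
          constructor
          · rintro (h1 | rfl)
            · exact Or.inl h1
            · exact Or.inr ⟨hin, rfl⟩
          · rintro (h1 | ⟨_, rfl⟩)
            · exact Or.inl h1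
            · simp
        · rename_i hin
          have hc : c ∉ obs := fun hm => hin ((pv_contains_iff obs c).mpr hm)
          simp only [beq_iff_eq]
          constructor
          · exact Or.inl
          · rintro (h1 | ⟨hmem, rfl⟩)
            · exact h1
            · exact absurd hmem hc

def pvCov (acc : PySem.Set Int × List (Int × Int)) (x : Int) : Prop :=
  x ∈ acc.1 ∨ ∃ r ∈ acc.2, r.1 ≤ x ∧ x ≤ r.2

set_option maxHeartbeats 1000000 in
theorem pvB_body_cov (acc : PySem.Set Int × List (Int × Int)) (p : String) (x : Int) :
    pvCov (pvB_body acc p) x ↔ pvCov acc x ∨ pvHit p x = true := by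
  unfold pvB_body pvHit pvCov
  split
  · simp
  · split
    · rcases h : PySem.Str.splitMax? (PySem.Str.strip p) "-" 1 with _ | ps
      · simp
      · match ps with
        | [] => simp
        | [a] => simp
        | a :: b :: t =>
          simp only []
          rcases ha : PySem.Int.ofStr? a with _ | la <;>
            rcases hb : PySem.Int.ofStr? b with _ | lb <;> simp only []
          · simp
          · simp
          · simp
          · simp only [List.mem_append, List.mem_singleton, Bool.and_eq_true, decide_eq_true_eq]
            constructor
            · rintro (h1 | ⟨r, hr | rfl, h2, h3⟩)
              · exact Or.inl (Or.inl h1)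
              · exact Or.inl (Or.inr ⟨r, hr, h2, h3⟩)
              · exact Or.inr ⟨h2, h3⟩
            · rintro ((h1 | ⟨r, hr, h2, h3⟩) | ⟨h2, h3⟩)
              · exact Or.inl h1
              · exact Or.inr ⟨r, Or.inl hr, h2, h3⟩
              · exact Or.inr ⟨(min la lb, max la lb), Or.inr rfl, h2, h3⟩
    · rcases hc : PySem.Int.ofStr? (PySem.Str.strip p) with _ | c
      · simp
      · simp only [PySem.Set.mem_add, beq_iff_eq]
        constructor
        · rintro ((h1 | h1) | h1)
          · exact Or.inl (Or.inl h1)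
          · exact Or.inr h1
          · exact Or.inl (Or.inr h1)
        · rintro ((h1 | h1) | h1)
          · exact Or.inl (Or.inl h1)
          · exact Or.inr h1
          · exact Or.inl (Or.inr h1)

theorem pvA_foldl_mem (obs : List Int) (ps : List String) (out0 : List Int) (x : Int) :
    x ∈ ps.foldl (pvA_body (PySem.Set.ofList obs)) out0 ↔
      x ∈ out0 ∨ (x ∈ obs ∧ ps.any (fun p => pvHit p x) = true) := by
  induction ps generalizing out0 with
  | nil => simp
  | cons p t ih =>
    simp only [List.foldl_cons, List.any_cons, ih, pvA_body_mem, Bool.or_eq_true]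
    tauto

theorem pvB_foldl_cov (ps : List String) (acc : PySem.Set Int × List (Int × Int)) (x : Int) :
    pvCov (ps.foldl pvB_body acc) x ↔ pvCov acc x ∨ ps.any (fun p => pvHit p x) = true := by
  induction ps generalizing acc with
  | nil => simp
  | cons p t ih =>
    simp only [List.foldl_cons, List.any_cons, ih, pvB_body_cov, Bool.or_eq_true]
    tauto

theorem pvB_pred_iff (acc : PySem.Set Int × List (Int × Int)) (x : Int) :
    pvB_pred acc x = true ↔ pvCov acc x := by
  unfold pvB_pred pvCov PySem.Set.contains
  simp [List.any_eq_true]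

-- ===== VERDICT (by name: the statement is the Claim_ definition above) =====
theorem parse_channel_list_py_spec : Claim_equal_parse_channel_list_py := by
  intro arg observed _
  show parse_channel_list_py arg observed = parse_channel_list_py_alt arg observed
  unfold parse_channel_list_py parse_channel_list_py_alt
  split
  · rfl
  · apply PySem.List.sorted_eq_sorted_of_perm _ _ _ (fun a b h => h)
    rw [List.perm_ext_iff_of_nodup (PySem.Set.nodup_ofList _) (PySem.Set.nodup_ofList _)]
    intro x
    rw [PySem.Set.mem_ofList, PySem.Set.mem_ofList, pvA_foldl_mem, List.mem_filter]
    simp only [pvB_pred_iff, pvB_foldl_cov]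
    simp only [pvCov, PySem.Set.empty, List.mem_nil_iff, false_or]
    constructor
    · rintro ⟨h1, h2⟩
      exact ⟨h1, Or.inr h2⟩
    · rintro ⟨h1, ⟨r, hf, -⟩ | h2⟩
      · exact hf.elim
      · exact ⟨h1, h2⟩
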